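-- pv_equiv track=rewrite | github.com/sioufia/formal_check_project | old/language_while.py | parenthesis_block
-- ===== SOURCE A (Python) =====
-- def parenthesis_block(input:str):
--     res=None,None
--     i=0
--     n=len(input)
--     open_parenthesis=False
--     while i<n:
--         if input[i]=="(":
--             open_parenthesis=True
--             break
--         i+=1
--
--     if open_parenthesis:
--         j=i+1
--         closing_parenthesis=False
--         nb_open_parenthesis=0
--         while j<n:
--             if input[j]=="(":
--                 nb_open_parenthesis+=1
--             elif input[j]==")":
--                 if nb_open_parenthesis==0:
--                     closing_parenthesis=True
--                     break
--                 else:nb_open_parenthesis-=1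
--             j+=1
--
--         if closing_parenthesis:
--             res=i+1,j-1
--
--     return res
-- ===== SOURCE B (Python) =====
-- def _match(s, k):
--     """s is the suffix of the original string starting at absolute index k.
--     Return (absolute index of the ')' closing the currently open block,
--     suffix after that ')'), or None.  Nested '('..')' blocks are skipped by
--     RECURSION on the nesting structure instead of a depth counter."""
--     while s:
--         c, s = s[0], s[1:]
--         if c == ")":
--             return k, s
--         k += 1
--         if c == "(":
--             inner = _match(s, k)
--             if inner is None:
--                 return None
--             j, s = inner
--             k = j + 1
--     return None
--
--
-- def parenthesis_block(input: str):
--     before, sep, after = input.partition("(")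
--     if not sep:
--         return None, None
--     i = len(before)
--     m = _match(after, i + 1)
--     if m is None:
--         return None, None
--     return i + 1, m[0] - 1
-- ===== Notes on version B (the rewrite author's own statement) =====
-- stated objective: alternative
-- what changed: A's flat scan with an integer depth counter is replaced by str.partition to split at the first '(' followed by a recursive matcher that skips each nested balanced block by a recursive call (recursion on the nesting structure, no depth counter).
import Mathlib
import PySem

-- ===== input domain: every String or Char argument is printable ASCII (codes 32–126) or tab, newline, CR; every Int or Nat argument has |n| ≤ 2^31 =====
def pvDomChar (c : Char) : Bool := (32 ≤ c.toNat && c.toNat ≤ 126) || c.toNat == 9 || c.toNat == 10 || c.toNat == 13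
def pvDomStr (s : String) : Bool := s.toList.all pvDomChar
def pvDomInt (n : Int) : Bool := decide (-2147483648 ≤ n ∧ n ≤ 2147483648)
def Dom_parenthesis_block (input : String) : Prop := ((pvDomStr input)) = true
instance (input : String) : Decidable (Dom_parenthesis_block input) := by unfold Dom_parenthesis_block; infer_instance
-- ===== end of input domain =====

-- B replaces A's depth-counter scan by str.partition at the first '(' plus a matcher that is
-- RECURSIVE on the nesting structure (objective: alternative).

-- ===== PORT A =====
-- A's first while loop: advance i until input[i] == '('; returns that index and the characters
-- after it (open_parenthesis=True ↔ some).
def pbFindOpen : List Char → Int → Option (Int × List Char)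
  | [], _ => none
  | c :: rest, i => if c = '(' then some (i, rest) else pbFindOpen rest (i + 1)

-- A's second while loop: from index j with nb_open_parenthesis open, find the matching ')'.
def pbFindClose : List Char → Int → Int → Option Int
  | [], _, _ => none
  | c :: rest, j, nb =>
    if c = '(' then pbFindClose rest (j + 1) (nb + 1)
    else if c = ')' then
      if nb = 0 then some j else pbFindClose rest (j + 1) (nb - 1)
    else pbFindClose rest (j + 1) nb

def parenthesis_block (input : String) : Option Int × Option Int :=
  match pbFindOpen input.toList 0 with
  | none => (none, none)
  | some (i, rest) =>
    match pbFindClose rest (i + 1) 0 with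
    | none => (none, none)
    | some j => (some (i + 1), some (j - 1))

-- ===== PORT B =====
-- the predicate of the partition split: "not the separator '('"
def pbNotOpen (c : Char) : Bool := c != '('

-- B's _match(s, k): s is the suffix starting at absolute index k; returns the absolute index of
-- the ')' closing the currently open block and the suffix after it, skipping each nested block
-- by a recursive call.  The subtype on the returned suffix only carries the length bound that
-- justifies termination of the call made on the suffix an inner call returns (proof payload).
def pbMatch : (s : List Char) → Int → Option (Int × {r : List Char // r.length < s.length})
  | [], _ => none
  | c :: s, k =>
    if c = ')' then some (k, ⟨s, by simp⟩)
    else if c = '(' then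
      match pbMatch s (k + 1) with
      | none => none
      | some (j, ⟨s', hs'⟩) =>
        (pbMatch s' (j + 1)).map
          (fun p => (p.1, ⟨p.2.val, Nat.lt_succ_of_lt (Nat.lt_trans p.2.property hs')⟩))
    else
      (pbMatch s (k + 1)).map (fun p => (p.1, ⟨p.2.val, Nat.lt_succ_of_lt p.2.property⟩))
termination_by s => s.length
decreasing_by
  · simp
  · exact Nat.lt_succ_of_lt hs'
  · simp

def parenthesis_block_alt (input : String) : Option Int × Option Int :=
  -- input.partition("(") ported by hand (PySem has no partition): before = chars up to the
  -- first '(' (takeWhile pbNotOpen), sep nonempty ↔ '(' occurs ↔ before shorter than input;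
  -- after = chars past the separator.  Exact for a 1-character separator.
  let l := input.toList
  let before := l.takeWhile pbNotOpen
  if before.length = l.length then (none, none)   -- sep == "" : no '(' in input
  else
    let i : Int := before.length
    match pbMatch (l.drop (before.length + 1)) (i + 1) with
    | none => (none, none)
    | some (j, _) => (some (i + 1), some (j - 1))

-- ===== PRECONDITION & SPEC =====
def Spec_parenthesis_block (input : String) (out : Option Int × Option Int) : Prop := out = parenthesis_block_alt input
instance (input : String) (out : Option Int × Option Int) : Decidable (Spec_parenthesis_block input out) := by unfold Spec_parenthesis_block; infer_instance

-- ===== CLAIM (what is proved, stated in full; the proofs are below) =====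
def Claim_equal_parenthesis_block : Prop := ∀ (input : String), Dom_parenthesis_block input → Spec_parenthesis_block input (parenthesis_block input)

-- ===== LEMMAS AND PROOFS =====

theorem pbTW_le (l : List Char) : (l.takeWhile pbNotOpen).length ≤ l.length := by
  induction l with
  | nil => simp
  | cons c r ih =>
    by_cases hc : pbNotOpen c
    · simpa [List.takeWhile_cons, hc] using Nat.succ_le_succ ih
    · simp [List.takeWhile_cons, hc]

-- A's first phase computes the partition split: none iff no '(' (before = whole string),
-- otherwise the index of the first '(' and the suffix after it.
theorem pbFindOpen_eq (l : List Char) : ∀ k : Int,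
    pbFindOpen l k =
      if (l.takeWhile pbNotOpen).length = l.length then none
      else some (k + (l.takeWhile pbNotOpen).length,
                 l.drop ((l.takeWhile pbNotOpen).length + 1)) := by
  induction l with
  | nil => intro k; simp [pbFindOpen]
  | cons c rest ih =>
    intro k
    by_cases hc : c = '('
    · simp [pbFindOpen, hc, pbNotOpen, List.takeWhile_cons]
    · have hno : pbNotOpen c = true := by simp [pbNotOpen, hc]
      have hle := pbTW_le rest
      simp only [pbFindOpen, if_neg hc, List.takeWhile_cons, hno, if_true, List.length_cons]
      rw [ih]
      by_cases h : (rest.takeWhile pbNotOpen).length = rest.length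
      · rw [if_pos h, if_pos (by omega)]
      · rw [if_neg h, if_neg (by omega), List.drop_succ_cons]
        simp only [Option.some.injEq, Prod.mk.injEq]
        exact ⟨by push_cast; ring, trivial⟩

-- Joint characterisation of A's second phase by B's recursive matcher, by strong induction on
-- the length of the suffix (an inner recursive call returns a strictly shorter suffix, so the
-- continued scan is within the induction hypothesis).
theorem pbMatch_close (N : Nat) : ∀ l : List Char, l.length ≤ N → ∀ k : Int,
    (pbFindClose l k 0 = (pbMatch l k).map (fun p => p.1)) ∧
    (∀ n : Nat, pbFindClose l k ((n : Int) + 1) =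
      match pbMatch l k with
      | none => none
      | some (j, r) => pbFindClose r.val (j + 1) (n : Int)) := by
  induction N with
  | zero =>
    intro l hl k
    have : l = [] := List.length_eq_zero_iff.mp (Nat.le_zero.mp hl)
    subst this
    simp [pbFindClose, pbMatch]
  | succ N ih =>
    intro l hl k
    match l with
    | [] => simp [pbFindClose, pbMatch]
    | c :: rest =>
      have hrest : rest.length ≤ N := by simpa using hl
      by_cases hcl : c = ')'
      · subst hcl
        constructor
        · simp [pbFindClose, pbMatch]
        · intro n
          simp [pbFindClose, pbMatch, show ¬((n : Int) + 1 = 0) by omega,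
                show ((n : Int) + 1 - 1) = (n : Int) by ring]
      · by_cases hop : c = '('
        · -- '(' : A increments nb; B recurses into the nested block, then continues after it.
          subst hop
          cases hm : pbMatch rest (k + 1) with
          | none =>
            constructor
            · have h2 := (ih rest hrest (k + 1)).2 0
              rw [hm] at h2; norm_num at h2
              simp [pbFindClose, pbMatch, hm, h2]
            · intro n
              have h2 := (ih rest hrest (k + 1)).2 (n + 1)
              rw [hm] at h2; push_cast at h2
              simp [pbFindClose, pbMatch, hm, h2]
          | some p =>
            obtain ⟨j, s', hs'⟩ := p
            constructor
            · have h2 := (ih rest hrest (k + 1)).2 0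
              rw [hm] at h2; norm_num at h2
              have h3 := (ih s' (by omega) (j + 1)).1
              cases hm2 : pbMatch s' (j + 1) with
              | none => rw [hm2] at h3; simp [pbFindClose, pbMatch, hm, hm2, h2, h3]
              | some q => rw [hm2] at h3; simp [pbFindClose, pbMatch, hm, hm2, h2, h3]
            · intro n
              have h2 := (ih rest hrest (k + 1)).2 (n + 1)
              rw [hm] at h2; push_cast at h2
              have h3 := (ih s' (by omega) (j + 1)).2 n
              cases hm2 : pbMatch s' (j + 1) with
              | none => rw [hm2] at h3; simp [pbFindClose, pbMatch, hm, hm2, h2, h3]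
              | some q => rw [hm2] at h3; simp [pbFindClose, pbMatch, hm, hm2, h2, h3]
        · -- ordinary character: both scans skip it.
          constructor
          · have h1 := (ih rest hrest (k + 1)).1
            cases hm : pbMatch rest (k + 1) with
            | none => rw [hm] at h1; simp [pbFindClose, pbMatch, hcl, hop, hm, h1]
            | some p => rw [hm] at h1; simp [pbFindClose, pbMatch, hcl, hop, hm, h1]
          · intro n
            have h1 := (ih rest hrest (k + 1)).2 n
            cases hm : pbMatch rest (k + 1) with
            | none => rw [hm] at h1; simp [pbFindClose, pbMatch, hcl, hop, hm, h1]
            | some p => rw [hm] at h1; simp [pbFindClose, pbMatch, hcl, hop, hm, h1]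

-- ===== VERDICT (by name: the statement is the Claim_ definition above) =====
theorem parenthesis_block_spec : Claim_equal_parenthesis_block := by
  intro input _
  show parenthesis_block input = parenthesis_block_alt input
  unfold parenthesis_block parenthesis_block_alt
  rw [pbFindOpen_eq]
  simp only []
  by_cases h : (input.toList.takeWhile pbNotOpen).length = input.toList.length
  · rw [if_pos h, if_pos h]
  · rw [if_neg h, if_neg h]
    simp only [zero_add]
    rw [(pbMatch_close _ _ le_rfl _).1]
    cases pbMatch (input.toList.drop ((input.toList.takeWhile pbNotOpen).length + 1))
        (((input.toList.takeWhile pbNotOpen).length : Int) + 1) <;> simp
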